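-- pv_equiv track=rewrite | github.com/MiikaNiemi/fleet-size-formula | deficit_function_without_dh.py | count_df
-- ===== SOURCE A (Python) =====
-- trips = {'AB1': {'dep_time': 560, 'arr_time': 695, 'dep_city': 'Terminal A', 'arr_city': 'Terminal B'},
--          'AB2': {'dep_time': 740, 'arr_time': 875, 'dep_city': 'Terminal A', 'arr_city': 'Terminal B'},
--          'AB3': {'dep_time': 830, 'arr_time': 965, 'dep_city': 'Terminal A', 'arr_city': 'Terminal B'},
--          'AB4': {'dep_time': 920, 'arr_time': 1055, 'dep_city': 'Terminal A', 'arr_city': 'Terminal B'},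
--          'AB5': {'dep_time': 980, 'arr_time': 1115, 'dep_city': 'Terminal A', 'arr_city': 'Terminal B'},
--          'AB6': {'dep_time': 1040, 'arr_time': 1175, 'dep_city': 'Terminal A', 'arr_city': 'Terminal B'},
--          'AB7': {'dep_time': 1100, 'arr_time': 1235, 'dep_city': 'Terminal A', 'arr_city': 'Terminal B'},
--          'AB8': {'dep_time': 1190, 'arr_time': 1325, 'dep_city': 'Terminal A', 'arr_city': 'Terminal B'},
--          'BA1': {'dep_time': 540, 'arr_time': 675, 'dep_city': 'Terminal B', 'arr_city': 'Terminal A'},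
--          'BA2': {'dep_time': 630, 'arr_time': 765, 'dep_city': 'Terminal B', 'arr_city': 'Terminal A'},
--          'BA3': {'dep_time': 720, 'arr_time': 855, 'dep_city': 'Terminal B', 'arr_city': 'Terminal A'},
--          'BA4': {'dep_time': 810, 'arr_time': 945, 'dep_city': 'Terminal B', 'arr_city': 'Terminal A'},
--          'BA5': {'dep_time': 900, 'arr_time': 1035, 'dep_city': 'Terminal B', 'arr_city': 'Terminal A'},
--          'BA6': {'dep_time': 990, 'arr_time': 1125, 'dep_city': 'Terminal B', 'arr_city': 'Terminal A'},
--          'BA7': {'dep_time': 1080, 'arr_time': 1215, 'dep_city': 'Terminal B', 'arr_city': 'Terminal A'},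
--          'BA8': {'dep_time': 1140, 'arr_time': 1275, 'dep_city': 'Terminal B', 'arr_city': 'Terminal A'},
--          'CA1': {'dep_time': 570, 'arr_time': 710, 'dep_city': 'Terminal C', 'arr_city': 'Terminal A'},
--          'CA2': {'dep_time': 740, 'arr_time': 880, 'dep_city': 'Terminal C', 'arr_city': 'Terminal A'},
--          'CA3': {'dep_time': 860, 'arr_time': 1000, 'dep_city': 'Terminal C', 'arr_city': 'Terminal A'},
--          'CA4': {'dep_time': 920, 'arr_time': 1060, 'dep_city': 'Terminal C', 'arr_city': 'Terminal A'},
--          'CA5': {'dep_time': 1040, 'arr_time': 1180, 'dep_city': 'Terminal C', 'arr_city': 'Terminal A'},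
--          'AC1': {'dep_time': 555, 'arr_time': 695, 'dep_city': 'Terminal A', 'arr_city': 'Terminal C'},
--          'AC2': {'dep_time': 675, 'arr_time': 815, 'dep_city': 'Terminal A', 'arr_city': 'Terminal C'},
--          'AC3': {'dep_time': 795, 'arr_time': 935, 'dep_city': 'Terminal A', 'arr_city': 'Terminal C'},
--          'AC4': {'dep_time': 1155, 'arr_time': 1295, 'dep_city': 'Terminal A', 'arr_city': 'Terminal C'},
--          'AC5': {'dep_time': 1215, 'arr_time': 1355, 'dep_city': 'Terminal A', 'arr_city': 'Terminal C'},
--          'AD1': {'dep_time': 560, 'arr_time': 770, 'dep_city': 'Terminal A', 'arr_city': 'Terminal D'},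
--          'DA1': {'dep_time': 860, 'arr_time': 1070, 'dep_city': 'Terminal D', 'arr_city': 'Terminal A'},
--          'CD1': {'dep_time': 450, 'arr_time': 720, 'dep_city': 'Terminal C', 'arr_city': 'Terminal D'},
--          'DC1': {'dep_time': 810, 'arr_time': 1080, 'dep_city': 'Terminal D', 'arr_city': 'Terminal C'}}
--
-- terminals = {'Terminal A': {'min_interval': 40},
--              'Terminal B': {'min_interval': 15},
--              'Terminal C': {'min_interval': 20},
--              'Terminal D': {'min_interval': 30}}
--
-- t0 = min(x['dep_time'] for x in trips.values())
--
-- t1 = max(x['arr_time'] for x in trips.values())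
--
-- def count_df(t_min=t0, t_max=t1):
--
--     # TOTAL PEAK VEHICLE REQUIREMENT
--     pvr = 0
--
--     # LIST FOR INITIAL IDS
--     initial_ids = []
--
--     for t in terminals:
--
--         # DEFICIT BY TERMINAL
--         df = 0
--
--         dep_times = sorted(v['dep_time'] for k, v in trips.items() if v['dep_city'] == t)
--         arr_times = sorted(v['arr_time'] for k, v in trips.items() if v['arr_city'] == t)
--
--         for minute in range(t_min, t_max+1):
--
--             # DEFICIT BY MINUTE
--             dep_amount = len(list(filter(lambda x: x <= minute, dep_times)))
--             arr_amount = len(list(filter(lambda x: x <= minute - terminals[t]['min_interval'], arr_times)))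
--             difference = dep_amount - arr_amount
--
--             # IF DEFICIT EXCEEDS PREVIOUS MAX, VEHICLE REQUIREMENT INCREASES
--             if difference > df:
--                 # DEPARTURES BY MINUTE AND INCREASE REQUIREMENT ARE NOT NECESSARILY THE SAME
--                 add_amount = difference - df
--                 # SORTING IS OPTIONAL
--                 trip_ids = sorted(list(k for k, v in trips.items() if v['dep_city'] == t and v['dep_time'] == minute),
--                                   key=lambda x: trips[x]['arr_time'] - trips[x]['dep_time'], reverse=True)
--                 initial_ids.extend(trip_ids[:add_amount])
--
--                 df = difference
--
--         pvr += df
--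
--     # NUMBER OF UNIQUE INITIAL IDS MUST MATCH WITH VEHICLE REQUIREMENT
--     if len(set(initial_ids)) == pvr:
--         return initial_ids
-- ===== SOURCE B (Python) =====
-- trips = {'AB1': {'dep_time': 560, 'arr_time': 695, 'dep_city': 'Terminal A', 'arr_city': 'Terminal B'},
--          'AB2': {'dep_time': 740, 'arr_time': 875, 'dep_city': 'Terminal A', 'arr_city': 'Terminal B'},
--          'AB3': {'dep_time': 830, 'arr_time': 965, 'dep_city': 'Terminal A', 'arr_city': 'Terminal B'},
--          'AB4': {'dep_time': 920, 'arr_time': 1055, 'dep_city': 'Terminal A', 'arr_city': 'Terminal B'},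
--          'AB5': {'dep_time': 980, 'arr_time': 1115, 'dep_city': 'Terminal A', 'arr_city': 'Terminal B'},
--          'AB6': {'dep_time': 1040, 'arr_time': 1175, 'dep_city': 'Terminal A', 'arr_city': 'Terminal B'},
--          'AB7': {'dep_time': 1100, 'arr_time': 1235, 'dep_city': 'Terminal A', 'arr_city': 'Terminal B'},
--          'AB8': {'dep_time': 1190, 'arr_time': 1325, 'dep_city': 'Terminal A', 'arr_city': 'Terminal B'},
--          'BA1': {'dep_time': 540, 'arr_time': 675, 'dep_city': 'Terminal B', 'arr_city': 'Terminal A'},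
--          'BA2': {'dep_time': 630, 'arr_time': 765, 'dep_city': 'Terminal B', 'arr_city': 'Terminal A'},
--          'BA3': {'dep_time': 720, 'arr_time': 855, 'dep_city': 'Terminal B', 'arr_city': 'Terminal A'},
--          'BA4': {'dep_time': 810, 'arr_time': 945, 'dep_city': 'Terminal B', 'arr_city': 'Terminal A'},
--          'BA5': {'dep_time': 900, 'arr_time': 1035, 'dep_city': 'Terminal B', 'arr_city': 'Terminal A'},
--          'BA6': {'dep_time': 990, 'arr_time': 1125, 'dep_city': 'Terminal B', 'arr_city': 'Terminal A'},
--          'BA7': {'dep_time': 1080, 'arr_time': 1215, 'dep_city': 'Terminal B', 'arr_city': 'Terminal A'},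
--          'BA8': {'dep_time': 1140, 'arr_time': 1275, 'dep_city': 'Terminal B', 'arr_city': 'Terminal A'},
--          'CA1': {'dep_time': 570, 'arr_time': 710, 'dep_city': 'Terminal C', 'arr_city': 'Terminal A'},
--          'CA2': {'dep_time': 740, 'arr_time': 880, 'dep_city': 'Terminal C', 'arr_city': 'Terminal A'},
--          'CA3': {'dep_time': 860, 'arr_time': 1000, 'dep_city': 'Terminal C', 'arr_city': 'Terminal A'},
--          'CA4': {'dep_time': 920, 'arr_time': 1060, 'dep_city': 'Terminal C', 'arr_city': 'Terminal A'},
--          'CA5': {'dep_time': 1040, 'arr_time': 1180, 'dep_city': 'Terminal C', 'arr_city': 'Terminal A'},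
--          'AC1': {'dep_time': 555, 'arr_time': 695, 'dep_city': 'Terminal A', 'arr_city': 'Terminal C'},
--          'AC2': {'dep_time': 675, 'arr_time': 815, 'dep_city': 'Terminal A', 'arr_city': 'Terminal C'},
--          'AC3': {'dep_time': 795, 'arr_time': 935, 'dep_city': 'Terminal A', 'arr_city': 'Terminal C'},
--          'AC4': {'dep_time': 1155, 'arr_time': 1295, 'dep_city': 'Terminal A', 'arr_city': 'Terminal C'},
--          'AC5': {'dep_time': 1215, 'arr_time': 1355, 'dep_city': 'Terminal A', 'arr_city': 'Terminal C'},
--          'AD1': {'dep_time': 560, 'arr_time': 770, 'dep_city': 'Terminal A', 'arr_city': 'Terminal D'},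
--          'DA1': {'dep_time': 860, 'arr_time': 1070, 'dep_city': 'Terminal D', 'arr_city': 'Terminal A'},
--          'CD1': {'dep_time': 450, 'arr_time': 720, 'dep_city': 'Terminal C', 'arr_city': 'Terminal D'},
--          'DC1': {'dep_time': 810, 'arr_time': 1080, 'dep_city': 'Terminal D', 'arr_city': 'Terminal C'}}
--
-- terminals = {'Terminal A': {'min_interval': 40},
--              'Terminal B': {'min_interval': 15},
--              'Terminal C': {'min_interval': 20},
--              'Terminal D': {'min_interval': 30}}
--
-- t0 = min(x['dep_time'] for x in trips.values())
-- t1 = max(x['arr_time'] for x in trips.values())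
--
-- def _dep_times(t):
--     return sorted(v['dep_time'] for v in trips.values() if v['dep_city'] == t)
--
--
-- def _arr_times(t):
--     return sorted(v['arr_time'] for v in trips.values() if v['arr_city'] == t)
--
--
-- def _candidates(t, m):
--     # departures from t at minute m, longest trip first (stable)
--     return sorted((k for k, v in trips.items() if v['dep_city'] == t and v['dep_time'] == m),
--                   key=lambda k: trips[k]['arr_time'] - trips[k]['dep_time'], reverse=True)
--
--
-- def _scan_step(t, iv, dep_times, arr_times, state, m):
--     df, ids = state
--     diff = len([x for x in dep_times if x <= m]) - len([x for x in arr_times if x <= m - iv])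
--     if df < diff:
--         ids = ids + _candidates(t, m)[:diff - df]
--         df = diff
--     return (df, ids)
--
--
-- def _terminal(term, t_min, t_max, acc):
--     # Event-driven sweep: the deficit can only grow at t_min or at a departure
--     # minute in (t_min, t_max], so only those minutes are examined.
--     t, iv = term
--     dep_times, arr_times = _dep_times(t), _arr_times(t)
--     state = (0, acc[1])
--     if t_min <= t_max:
--         for m in [t_min] + [d for d in dep_times if t_min < d <= t_max]:
--             state = _scan_step(t, iv, dep_times, arr_times, state, m)
--     return (acc[0] + state[0], state[1])
--
--
-- def count_df(t_min=t0, t_max=t1):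
--     acc = (0, [])
--     for term in terminals.items():
--         acc = _terminal((term[0], term[1]['min_interval']), t_min, t_max, acc)
--     return acc[1] if len(set(acc[1])) == acc[0] else None
-- ===== Notes on version B (the rewrite author's own statement) =====
-- stated objective: faster
-- what changed: Replaces A's scan of every minute in [t_min, t_max] (recomputing deficits per minute) by an event-driven sweep that evaluates the deficit only at t_min and at departure minutes inside (t_min, t_max], where alone it can grow.
import Mathlib
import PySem

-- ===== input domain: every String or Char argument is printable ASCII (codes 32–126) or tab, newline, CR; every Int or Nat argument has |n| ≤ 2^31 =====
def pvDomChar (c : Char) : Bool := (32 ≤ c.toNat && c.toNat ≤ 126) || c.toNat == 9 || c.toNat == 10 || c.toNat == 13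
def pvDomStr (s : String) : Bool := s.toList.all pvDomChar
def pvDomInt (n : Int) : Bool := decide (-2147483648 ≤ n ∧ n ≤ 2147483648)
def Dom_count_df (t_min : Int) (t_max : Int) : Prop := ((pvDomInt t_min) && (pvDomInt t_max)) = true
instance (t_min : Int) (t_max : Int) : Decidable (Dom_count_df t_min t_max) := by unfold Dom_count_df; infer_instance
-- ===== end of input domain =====

-- B replaces A's scan of EVERY minute in [t_min, t_max] by an event-driven sweep over
-- t_min and the departure minutes only (the deficit can only grow there); objective: faster.

-- module-level data (the 'trips' and 'terminals' dicts, shared by both programs):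
-- (id, dep_time, arr_time, dep_city, arr_city), in dict insertion order
def pvTrips : List (String × Int × Int × String × String) :=
  [("AB1", 560, 695, "Terminal A", "Terminal B"),
   ("AB2", 740, 875, "Terminal A", "Terminal B"),
   ("AB3", 830, 965, "Terminal A", "Terminal B"),
   ("AB4", 920, 1055, "Terminal A", "Terminal B"),
   ("AB5", 980, 1115, "Terminal A", "Terminal B"),
   ("AB6", 1040, 1175, "Terminal A", "Terminal B"),
   ("AB7", 1100, 1235, "Terminal A", "Terminal B"),
   ("AB8", 1190, 1325, "Terminal A", "Terminal B"),
   ("BA1", 540, 675, "Terminal B", "Terminal A"),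
   ("BA2", 630, 765, "Terminal B", "Terminal A"),
   ("BA3", 720, 855, "Terminal B", "Terminal A"),
   ("BA4", 810, 945, "Terminal B", "Terminal A"),
   ("BA5", 900, 1035, "Terminal B", "Terminal A"),
   ("BA6", 990, 1125, "Terminal B", "Terminal A"),
   ("BA7", 1080, 1215, "Terminal B", "Terminal A"),
   ("BA8", 1140, 1275, "Terminal B", "Terminal A"),
   ("CA1", 570, 710, "Terminal C", "Terminal A"),
   ("CA2", 740, 880, "Terminal C", "Terminal A"),
   ("CA3", 860, 1000, "Terminal C", "Terminal A"),
   ("CA4", 920, 1060, "Terminal C", "Terminal A"),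
   ("CA5", 1040, 1180, "Terminal C", "Terminal A"),
   ("AC1", 555, 695, "Terminal A", "Terminal C"),
   ("AC2", 675, 815, "Terminal A", "Terminal C"),
   ("AC3", 795, 935, "Terminal A", "Terminal C"),
   ("AC4", 1155, 1295, "Terminal A", "Terminal C"),
   ("AC5", 1215, 1355, "Terminal A", "Terminal C"),
   ("AD1", 560, 770, "Terminal A", "Terminal D"),
   ("DA1", 860, 1070, "Terminal D", "Terminal A"),
   ("CD1", 450, 720, "Terminal C", "Terminal D"),
   ("DC1", 810, 1080, "Terminal D", "Terminal C")]

-- (terminal, min_interval) in dict insertion order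
def pvTerminals : List (String × Int) :=
  [("Terminal A", 40), ("Terminal B", 15), ("Terminal C", 20), ("Terminal D", 30)]

-- trips[x]['arr_time'] - trips[x]['dep_time'] : lookup of an existing key (exact on the
-- keys that occur, which all come from pvTrips itself)
def pvDur (k : String) : Int :=
  match pvTrips.find? (fun tr => tr.1 == k) with
  | some tr => tr.2.2.1 - tr.2.1
  | none => 0

-- ===== PORT A =====
-- literal transliteration: for each terminal, scan EVERY minute in range(t_min, t_max+1);
-- df is per-terminal, initial_ids is threaded through as global state.
-- trip_ids[:add_amount] is .take add_amount.toNat — exact since the branch forces 0 < add_amount.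
def count_df (t_min : Int) (t_max : Int) : Option (List String) :=
  let res := pvTerminals.foldl (fun (acc : Int × List String) (term : String × Int) =>
    let dep_times := PySem.List.sorted ((pvTrips.filter (fun tr => tr.2.2.2.1 == term.1)).map (fun tr => tr.2.1)) (fun x => x) false
    let arr_times := PySem.List.sorted ((pvTrips.filter (fun tr => tr.2.2.2.2 == term.1)).map (fun tr => tr.2.2.1)) (fun x => x) false
    let r := (PySem.List.pyRange t_min (t_max + 1) 1).foldl (fun (s : Int × List String) minute =>
      let dep_amount : Int := ((dep_times.filter (fun x => decide (x ≤ minute))).length : Int)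
      let arr_amount : Int := ((arr_times.filter (fun x => decide (x ≤ minute - term.2))).length : Int)
      let difference := dep_amount - arr_amount
      if s.1 < difference then
        let add_amount := difference - s.1
        let trip_ids := PySem.List.sorted ((pvTrips.filter (fun tr => tr.2.2.2.1 == term.1 && tr.2.1 == minute)).map (fun tr => tr.1)) pvDur true
        (difference, s.2 ++ trip_ids.take add_amount.toNat)
      else s) (0, acc.2)
    (acc.1 + r.1, r.2)) (0, [])
  if ((PySem.Set.ofList res.2).length : Int) = res.1 then some res.2 else none

-- ===== PORT B =====
def pvDeps (t : String) : List Int :=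
  PySem.List.sorted ((pvTrips.filter (fun tr => tr.2.2.2.1 == t)).map (fun tr => tr.2.1)) (fun x => x) false

def pvArrs (t : String) : List Int :=
  PySem.List.sorted ((pvTrips.filter (fun tr => tr.2.2.2.2 == t)).map (fun tr => tr.2.2.1)) (fun x => x) false

def pvCands (t : String) (m : Int) : List String :=
  PySem.List.sorted ((pvTrips.filter (fun tr => tr.2.2.2.1 == t && tr.2.1 == m)).map (fun tr => tr.1)) pvDur true

-- _scan_step: cand[:diff - df] is .take (diff - df).toNat — exact since 0 < diff - df in the branch
def pvScanStep (t : String) (iv : Int) (dep_times arr_times : List Int) (s : Int × List String) (m : Int) : Int × List String :=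
  let diff : Int := ((dep_times.filter (fun x => decide (x ≤ m))).length : Int) - ((arr_times.filter (fun x => decide (x ≤ m - iv))).length : Int)
  if s.1 < diff then (diff, s.2 ++ (pvCands t m).take (diff - s.1).toNat) else s

def pvTerminal (term : String × Int) (t_min t_max : Int) (acc : Int × List String) : Int × List String :=
  let dep_times := pvDeps term.1
  let arr_times := pvArrs term.1
  let state :=
    if t_min ≤ t_max then
      (t_min :: dep_times.filter (fun d => decide (t_min < d ∧ d ≤ t_max))).foldl (pvScanStep term.1 term.2 dep_times arr_times) (0, acc.2)
    else (0, acc.2)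
  (acc.1 + state.1, state.2)

def count_df_alt (t_min : Int) (t_max : Int) : Option (List String) :=
  let acc := pvTerminals.foldl (fun acc term => pvTerminal term t_min t_max acc) (0, [])
  if ((PySem.Set.ofList acc.2).length : Int) = acc.1 then some acc.2 else none

-- ===== PRECONDITION & SPEC =====
def Spec_count_df (t_min : Int) (t_max : Int) (out : Option (List String)) : Prop := out = count_df_alt t_min t_max
instance (t_min : Int) (t_max : Int) (out : Option (List String)) : Decidable (Spec_count_df t_min t_max out) := by unfold Spec_count_df; infer_instance

-- ===== CLAIM (what is proved, stated in full; the proofs are below) =====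
def Claim_equal_count_df : Prop := ∀ (t_min : Int) (t_max : Int), Dom_count_df t_min t_max → Spec_count_df t_min t_max (count_df t_min t_max)

-- ===== LEMMAS AND PROOFS =====

-- the per-minute deficit at terminal data (dep list D, arr list A, interval iv)
def pvDiff (D A : List Int) (iv m : Int) : Int :=
  ((D.filter (fun x => decide (x ≤ m))).length : Int) - ((A.filter (fun x => decide (x ≤ m - iv))).length : Int)

theorem pvScanStep_diff (t : String) (iv : Int) (D A : List Int) (s : Int × List String) (m : Int) :
    pvScanStep t iv D A s m =
      (if s.1 < pvDiff D A iv m then (pvDiff D A iv m, s.2 ++ (pvCands t m).take (pvDiff D A iv m - s.1).toNat) else s) := rfl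

theorem pvStep_fst_ge (t : String) (iv : Int) (D A : List Int) (s : Int × List String) (m : Int) :
    pvDiff D A iv m ≤ (pvScanStep t iv D A s m).1 := by
  rw [pvScanStep_diff]
  split_ifs with h
  · exact le_refl _
  · omega

theorem pvStep_noop (t : String) (iv : Int) (D A : List Int) (s : Int × List String) (m : Int)
    (h : pvDiff D A iv m ≤ s.1) : pvScanStep t iv D A s m = s := by
  rw [pvScanStep_diff]
  split_ifs with h'
  · omega
  · rfl

theorem pvDiff_mono (D A : List Int) (iv m : Int) (hm : (m + 1) ∉ D) :
    pvDiff D A iv (m + 1) ≤ pvDiff D A iv m := by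
  unfold pvDiff
  have h1 : D.filter (fun x => decide (x ≤ m + 1)) = D.filter (fun x => decide (x ≤ m)) := by
    apply List.filter_congr
    intro x hx
    have : x ≠ m + 1 := fun he => hm (he ▸ hx)
    simp only [decide_eq_decide]; omega
  have h2 : (A.filter (fun x => decide (x ≤ m - iv))).length ≤ (A.filter (fun x => decide (x ≤ m + 1 - iv))).length := by
    rw [← List.countP_eq_length_filter, ← List.countP_eq_length_filter]
    exact List.countP_mono_left (fun x _ hx => by
      simp only [decide_eq_true_eq] at hx ⊢; omega)
  rw [h1]; omega

-- absorbing repeated events at the same minute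
theorem pvStep_absorb (t : String) (iv : Int) (D A : List Int) (s : Int × List String) (m : Int)
    (l : List Int) (hl : ∀ x ∈ l, x = m) :
    l.foldl (pvScanStep t iv D A) (pvScanStep t iv D A s m) = pvScanStep t iv D A s m := by
  induction l with
  | nil => rfl
  | cons x tl ih =>
    have hx : x = m := hl x List.mem_cons_self
    subst hx
    simp only [List.foldl_cons]
    rw [pvStep_noop t iv D A _ x (pvStep_fst_ge t iv D A s x)]
    exact ih (fun y hy => hl y (List.mem_cons_of_mem _ hy))

theorem pvStep_absorb_all (t : String) (iv : Int) (D A : List Int) (s : Int × List String) (m : Int)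
    (l : List Int) (hl : ∀ x ∈ l, x = m) (hne : l ≠ []) :
    l.foldl (pvScanStep t iv D A) s = pvScanStep t iv D A s m := by
  cases l with
  | nil => exact absurd rfl hne
  | cons x tl =>
    have hx : x = m := hl x List.mem_cons_self
    subst hx
    simp only [List.foldl_cons]
    exact pvStep_absorb t iv D A s x tl (fun y hy => hl y (List.mem_cons_of_mem _ hy))

-- split a sorted list's window filter at the new right end
theorem pvFilter_split (l : List Int) (hl : l.Pairwise (· ≤ ·)) (a m : Int) (ham : a ≤ m) :
    l.filter (fun d => decide (a < d ∧ d ≤ m + 1)) =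
      l.filter (fun d => decide (a < d ∧ d ≤ m)) ++ l.filter (fun d => decide (d = m + 1)) := by
  induction l with
  | nil => simp
  | cons x tl ih =>
    rw [List.pairwise_cons] at hl
    obtain ⟨hx, htl⟩ := hl
    by_cases hxm : x = m + 1
    · subst hxm
      have h1 : tl.filter (fun d => decide (a < d ∧ d ≤ m)) = [] :=
        List.filter_eq_nil_iff.mpr (fun d hd => by
          have := hx d hd
          simp only [decide_eq_true_eq, not_and]
          omega)
      have h2 : tl.filter (fun d => decide (a < d ∧ d ≤ m + 1)) = tl.filter (fun d => decide (d = m + 1)) :=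
        List.filter_congr (fun d hd => by
          have := hx d hd
          simp only [decide_eq_decide]; omega)
      rw [List.filter_cons, List.filter_cons, List.filter_cons,
        if_pos (show decide (a < m + 1 ∧ m + 1 ≤ m + 1) = true by simp only [decide_eq_true_eq]; omega),
        if_neg (show ¬ decide (a < m + 1 ∧ m + 1 ≤ m) = true by simp only [decide_eq_true_eq, not_and]; omega),
        if_pos (show decide ((m + 1 : Int) = m + 1) = true by simp),
        h1, h2]
      simp
    · have ceq : (fun d => decide (a < d ∧ d ≤ m + 1)) x = (fun d => decide (a < d ∧ d ≤ m)) x := by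
        simp only [decide_eq_decide]; omega
      simp only [List.filter_cons, ceq, hxm, decide_false]
      rw [ih htl]
      by_cases hc : (decide (a < x ∧ x ≤ m) = true) <;> simp [hc]

-- MAIN: the minute-by-minute fold over [t_min, t_min+n] equals the event fold
theorem pvSweep (t : String) (iv : Int) (D A : List Int) (hD : D.Pairwise (· ≤ ·)) (t_min : Int) :
    ∀ (n : Nat) (s0 : Int × List String),
      (PySem.List.pyRange t_min (t_min + (n : Int) + 1) 1).foldl (pvScanStep t iv D A) s0 =
        (D.filter (fun d => decide (t_min < d ∧ d ≤ t_min + (n : Int)))).foldl (pvScanStep t iv D A)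
          (pvScanStep t iv D A s0 t_min) ∧
      pvDiff D A iv (t_min + (n : Int)) ≤
        ((PySem.List.pyRange t_min (t_min + (n : Int) + 1) 1).foldl (pvScanStep t iv D A) s0).1 := by
  intro n
  induction n with
  | zero =>
    intro s0
    simp only [Nat.cast_zero, add_zero]
    have hf : D.filter (fun d => decide (t_min < d ∧ d ≤ t_min)) = [] :=
      List.filter_eq_nil_iff.mpr (fun d _ => by
        simp only [decide_eq_true_eq, not_and]; omega)
    rw [PySem.List.pyRange_one_singleton, hf]
    refine ⟨rfl, ?_⟩
    simpa using pvStep_fst_ge t iv D A s0 t_min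
  | succ n ih =>
    intro s0
    obtain ⟨iheq, ihge⟩ := ih s0
    simp only [Nat.cast_add, Nat.cast_one, ← add_assoc]
    have hsplit : PySem.List.pyRange t_min (t_min + (n : Int) + 1 + 1) 1 =
        PySem.List.pyRange t_min (t_min + (n : Int) + 1) 1 ++ [t_min + (n : Int) + 1] :=
      PySem.List.pyRange_one_succ_right (by omega)
    have hfs : D.filter (fun d => decide (t_min < d ∧ d ≤ t_min + (n : Int) + 1)) =
        D.filter (fun d => decide (t_min < d ∧ d ≤ t_min + (n : Int))) ++
          D.filter (fun d => decide (d = t_min + (n : Int) + 1)) :=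
      pvFilter_split D hD t_min (t_min + (n : Int)) (by omega)
    rw [hsplit, hfs, List.foldl_append, List.foldl_append, ← iheq]
    set sL := (PySem.List.pyRange t_min (t_min + (n : Int) + 1) 1).foldl (pvScanStep t iv D A) s0 with hsL
    simp only [List.foldl_cons, List.foldl_nil]
    by_cases hmem : (t_min + (n : Int) + 1) ∈ D
    · refine ⟨?_, pvStep_fst_ge t iv D A sL _⟩
      exact (pvStep_absorb_all t iv D A sL (t_min + (n : Int) + 1) _
        (fun x hx => by
          have := List.of_mem_filter hx
          simpa using this)
        (by
          intro hnil
          have : (t_min + (n : Int) + 1) ∈ D.filter (fun d => decide (d = t_min + (n : Int) + 1)) :=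
            List.mem_filter.mpr ⟨hmem, by simp⟩
          rw [hnil] at this
          exact List.not_mem_nil this)).symm
    · have hempty : D.filter (fun d => decide (d = t_min + (n : Int) + 1)) = [] :=
        List.filter_eq_nil_iff.mpr (fun d hd => by
          simp only [decide_eq_true_eq]
          intro he; exact hmem (he ▸ hd))
      have hle : pvDiff D A iv (t_min + (n : Int) + 1) ≤ sL.1 :=
        le_trans (pvDiff_mono D A iv (t_min + (n : Int)) hmem) ihge
      rw [hempty]
      simp only [List.foldl_nil]
      exact ⟨pvStep_noop t iv D A sL _ hle, by rw [pvStep_noop t iv D A sL _ hle]; exact hle⟩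

-- A's per-terminal pass equals B's pvTerminal
theorem pvTerminal_eq (term : String × Int) (t_min t_max : Int) (acc : Int × List String) :
    (let r := (PySem.List.pyRange t_min (t_max + 1) 1).foldl
        (pvScanStep term.1 term.2 (pvDeps term.1) (pvArrs term.1)) (0, acc.2)
     ((acc.1 + r.1, r.2) : Int × List String)) = pvTerminal term t_min t_max acc := by
  unfold pvTerminal
  by_cases h : t_min ≤ t_max
  · have hD : (pvDeps term.1).Pairwise (· ≤ ·) :=
      PySem.List.sorted_pairwise
        ((pvTrips.filter (fun tr => tr.2.2.2.1 == term.1)).map (fun tr => tr.2.1)) (fun x => x)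
    obtain ⟨n, hn⟩ : ∃ n : Nat, t_max = t_min + (n : Int) := ⟨(t_max - t_min).toNat, by omega⟩
    subst hn
    obtain ⟨heq, -⟩ := pvSweep term.1 term.2 (pvDeps term.1) (pvArrs term.1) hD t_min n (0, acc.2)
    simp only [h, if_true, List.foldl_cons]
    rw [heq]
  · have hnil : PySem.List.pyRange t_min (t_max + 1) 1 = [] :=
      PySem.List.pyRange_one_eq_nil (by omega)
    simp only [h, if_false, hnil, List.foldl_nil]

-- ===== VERDICT (by name: the statement is the Claim_ definition above) =====
theorem count_df_spec : Claim_equal_count_df := by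
  intro t_min t_max _
  unfold Spec_count_df count_df count_df_alt
  have hstep : (fun (acc : Int × List String) (term : String × Int) =>
      let dep_times := PySem.List.sorted ((pvTrips.filter (fun tr => tr.2.2.2.1 == term.1)).map (fun tr => tr.2.1)) (fun x => x) false
      let arr_times := PySem.List.sorted ((pvTrips.filter (fun tr => tr.2.2.2.2 == term.1)).map (fun tr => tr.2.2.1)) (fun x => x) false
      let r := (PySem.List.pyRange t_min (t_max + 1) 1).foldl (fun (s : Int × List String) minute =>
        let dep_amount : Int := ((dep_times.filter (fun x => decide (x ≤ minute))).length : Int)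
        let arr_amount : Int := ((arr_times.filter (fun x => decide (x ≤ minute - term.2))).length : Int)
        let difference := dep_amount - arr_amount
        if s.1 < difference then
          let add_amount := difference - s.1
          let trip_ids := PySem.List.sorted ((pvTrips.filter (fun tr => tr.2.2.2.1 == term.1 && tr.2.1 == minute)).map (fun tr => tr.1)) pvDur true
          (difference, s.2 ++ trip_ids.take add_amount.toNat)
        else s) (0, acc.2)
      ((acc.1 + r.1, r.2) : Int × List String)) =
      (fun acc term => pvTerminal term t_min t_max acc) := by
    funext acc term
    exact pvTerminal_eq term t_min t_max acc
  rw [hstep]
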